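-- pv_equiv track=rewrite | github.com/Brooklyn-STEAM/10047-Upgrading-Students-Schedules-Through-Goals-Aware-Suggestions | course_assigner.py | _balanced_merge
-- ===== SOURCE A (Python) =====
-- def _balanced_merge(category_to_courses, total_limit=10):
--     """
--     Correct merge:
--     - Preserve the order inside each category list (progression stays first)
--     - Merge categories in the order they appear
--     - Stop at total_limit
--     """
--     result = []
--     seen = set()
--
--     # Iterate categories in the order they appear
--     for cat, courses in category_to_courses.items():
--         for c in courses:
--             if c not in seen:
--                 seen.add(c)
--                 result.append(c)
--             if len(result) >= total_limit:
--                 return result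
--
--     return result
-- ===== SOURCE B (Python) =====
-- def _balanced_merge(category_to_courses, total_limit=10):
--     all_courses = [c for courses in category_to_courses.values() for c in courses]
--     unique = list(dict.fromkeys(all_courses))
--     return unique[:max(total_limit, 0)]
-- ===== Notes on version B (the rewrite author's own statement) =====
-- stated objective: simpler
-- what changed: A's single interleaved pass (dedup with an early-exit length check after every course) is replaced by a two-phase decomposition: flatten all category lists, order-preserving dedup via dict.fromkeys, then cap with one non-negative slice.
-- intended difference: For total_limit <= 0 when at least one course exists, A returns a one-element list (the first course) because the cap is only checked after appending; B returns the empty list, the intended result of a non-positive limit. — e.g. on _balanced_merge([("math", ["X"])], 0): A returns ["X"], B returns []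
import Mathlib
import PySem

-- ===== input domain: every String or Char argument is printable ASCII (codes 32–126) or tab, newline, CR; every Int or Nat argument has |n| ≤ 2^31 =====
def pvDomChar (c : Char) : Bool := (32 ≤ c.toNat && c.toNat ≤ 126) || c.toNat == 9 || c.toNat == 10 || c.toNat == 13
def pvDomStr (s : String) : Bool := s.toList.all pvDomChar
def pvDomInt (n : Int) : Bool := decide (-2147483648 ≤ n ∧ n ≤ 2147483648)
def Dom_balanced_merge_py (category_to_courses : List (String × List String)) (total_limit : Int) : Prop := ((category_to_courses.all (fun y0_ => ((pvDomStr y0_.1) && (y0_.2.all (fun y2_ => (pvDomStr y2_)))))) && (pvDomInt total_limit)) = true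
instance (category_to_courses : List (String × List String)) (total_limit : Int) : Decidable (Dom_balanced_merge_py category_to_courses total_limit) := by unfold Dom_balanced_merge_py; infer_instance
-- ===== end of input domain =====

-- B replaces A's interleaved dedup-with-early-exit by a two-phase pass (flatten, ordered dedup,
-- then cap with a non-negative slice); for total_limit ≤ 0 B returns the empty list where A returns one element.

-- ===== PORT A =====
-- inner 'for c in courses' loop; Sum.inr = the early 'return result', Sum.inl = loop finished
def bmInner (limit : Int) : List String → List String → PySem.Set String →
    (List String × PySem.Set String) ⊕ List String
  | [], result, seen => Sum.inl (result, seen)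
  | c :: rest, result, seen =>
    let p := if PySem.Set.contains seen c then (result, seen)
             else (result ++ [c], PySem.Set.add seen c)
    if limit ≤ (p.1.length : Int) then Sum.inr p.1
    else bmInner limit rest p.1 p.2

-- outer 'for cat, courses in category_to_courses.items()' loop
def bmOuter (limit : Int) : List (String × List String) → List String → PySem.Set String → List String
  | [], result, _ => result
  | (_, courses) :: rest, result, seen =>
    match bmInner limit courses result seen with
    | Sum.inr r => r
    | Sum.inl (result', seen') => bmOuter limit rest result' seen'

def balanced_merge_py (category_to_courses : List (String × List String)) (total_limit : Int) : List String :=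
  bmOuter total_limit category_to_courses [] PySem.Set.empty

-- ===== PORT B =====
def balanced_merge_py_alt (category_to_courses : List (String × List String)) (total_limit : Int) : List String :=
  let all_courses := (category_to_courses.map Prod.snd).flatten
  let unique := PySem.List.dedup all_courses
  PySem.List.slice unique none (some (max total_limit 0))

-- ===== PRECONDITION & SPEC =====
-- For total_limit ≤ 0 with at least one course present, A returns a one-element list (the first
-- course) because the cap is only checked after appending; B returns the empty list, the intended result of a
-- non-positive limit.
def D_balanced_merge_py (category_to_courses : List (String × List String)) (total_limit : Int) : Prop :=
  total_limit ≤ 0 ∧ category_to_courses.any (fun p => !p.2.isEmpty) = true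
instance (category_to_courses : List (String × List String)) (total_limit : Int) : Decidable (D_balanced_merge_py category_to_courses total_limit) := by unfold D_balanced_merge_py; infer_instance

def Spec_balanced_merge_py (category_to_courses : List (String × List String)) (total_limit : Int) (out : List String) : Prop := ¬ D_balanced_merge_py category_to_courses total_limit → out = balanced_merge_py_alt category_to_courses total_limit
instance (category_to_courses : List (String × List String)) (total_limit : Int) (out : List String) : Decidable (Spec_balanced_merge_py category_to_courses total_limit out) := by unfold Spec_balanced_merge_py; infer_instance

def pvDiffWitness_balanced_merge_py : (List (String × List String)) × Int := ([("math", ["X"])], 0)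
def pvDiffWitnessOut_balanced_merge_py : (List String) × (List String) := (["X"], [])

-- ===== CLAIM (what is proved, stated in full; the proofs are below) =====
def Claim_unchanged_balanced_merge_py : Prop := ∀ (category_to_courses : List (String × List String)) (total_limit : Int), Dom_balanced_merge_py category_to_courses total_limit → Spec_balanced_merge_py category_to_courses total_limit (balanced_merge_py category_to_courses total_limit)
def Claim_changed_balanced_merge_py : Prop := Dom_balanced_merge_py (pvDiffWitness_balanced_merge_py.1) (pvDiffWitness_balanced_merge_py.2) ∧ D_balanced_merge_py (pvDiffWitness_balanced_merge_py.1) (pvDiffWitness_balanced_merge_py.2) ∧ balanced_merge_py (pvDiffWitness_balanced_merge_py.1) (pvDiffWitness_balanced_merge_py.2) = pvDiffWitnessOut_balanced_merge_py.1 ∧ balanced_merge_py_alt (pvDiffWitness_balanced_merge_py.1) (pvDiffWitness_balanced_merge_py.2) = pvDiffWitnessOut_balanced_merge_py.2 ∧ pvDiffWitnessOut_balanced_merge_py.1 ≠ pvDiffWitnessOut_balanced_merge_py.2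
def Claim_exact_balanced_merge_py : Prop := ∀ (category_to_courses : List (String × List String)) (total_limit : Int), Dom_balanced_merge_py category_to_courses total_limit → D_balanced_merge_py category_to_courses total_limit → balanced_merge_py category_to_courses total_limit ≠ balanced_merge_py_alt category_to_courses total_limit

-- ===== LEMMAS AND PROOFS =====

-- folding Set.add only appends to the accumulator
theorem foldl_add_prefix (l : List String) (acc : PySem.Set String) :
    ∃ t, l.foldl PySem.Set.add acc = acc ++ t := by
  induction l generalizing acc with
  | nil => exact ⟨[], by simp⟩
  | cons x xs ih =>
    simp only [List.foldl_cons, PySem.Set.add]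
    split
    · exact ih acc
    · obtain ⟨t, ht⟩ := ih (acc ++ [x])
      exact ⟨x :: t, by simpa using ht⟩

-- the inner loop, with seen = result, computes the fold of Set.add with a cap
theorem bmInner_eq (limit : Int) (courses : List String) (res : List String)
    (h : (res.length : Int) < limit) :
    bmInner limit courses res res =
      (if ((courses.foldl PySem.Set.add res).length : Int) < limit
       then Sum.inl ((courses.foldl PySem.Set.add res), (courses.foldl PySem.Set.add res))
       else Sum.inr ((courses.foldl PySem.Set.add res).take limit.toNat)) := by
  induction courses generalizing res with
  | nil => simp [bmInner, h]
  | cons c rest ih =>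
    have hadd : (if PySem.Set.contains res c then (res, res)
        else (res ++ [c], PySem.Set.add res c)) = (PySem.Set.add res c, PySem.Set.add res c) := by
      simp only [PySem.Set.add]; split <;> simp
    by_cases hl : limit ≤ ((PySem.Set.add res c).length : Int)
    · -- early return: result' has length exactly limit, and it is a prefix of the full fold
      have hlen : ((PySem.Set.add res c).length : Int) = limit := by
        have : (PySem.Set.add res c).length ≤ res.length + 1 := by
          simp only [PySem.Set.add]; split <;> simp
        omega
      have hn : limit.toNat = (PySem.Set.add res c).length := by omega
      obtain ⟨t, ht⟩ := foldl_add_prefix rest (PySem.Set.add res c)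
      have hflen : limit ≤ (((c :: rest).foldl PySem.Set.add res).length : Int) := by
        simp only [List.foldl_cons, ht, List.length_append]; push_cast; omega
      have htake : ((c :: rest).foldl PySem.Set.add res).take limit.toNat
          = PySem.Set.add res c := by
        simp only [List.foldl_cons, ht, hn]
        exact List.take_left
      simp only [bmInner, hadd, if_pos hl, if_neg (not_lt.mpr hflen), htake]
    · simp only [bmInner, hadd, if_neg hl]
      rw [ih (PySem.Set.add res c) (by omega)]
      simp [List.foldl_cons]

-- the outer loop computes the capped ordered dedup of the flattened course lists
theorem bmOuter_eq (limit : Int) (cats : List (String × List String)) (res : List String)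
    (h : (res.length : Int) < limit) :
    bmOuter limit cats res res =
      (((cats.map Prod.snd).flatten).foldl PySem.Set.add res).take limit.toNat := by
  induction cats generalizing res with
  | nil =>
    simp only [bmOuter, List.map_nil, List.flatten_nil, List.foldl_nil]
    rw [List.take_of_length_le (by omega)]
  | cons p rest ih =>
    obtain ⟨cat, courses⟩ := p
    by_cases hlt : ((courses.foldl PySem.Set.add res).length : Int) < limit
    · simp only [bmOuter, bmInner_eq limit courses res h, if_pos hlt, List.map_cons,
        List.flatten_cons, List.foldl_append]
      exact ih _ hlt
    · simp only [bmOuter, bmInner_eq limit courses res h, if_neg hlt, List.map_cons,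
        List.flatten_cons, List.foldl_append]
      obtain ⟨t, ht⟩ :=
        foldl_add_prefix ((rest.map Prod.snd).flatten) (courses.foldl PySem.Set.add res)
      rw [ht, List.take_append_of_le_length (by omega)]

-- with a non-positive limit, A returns one element as soon as any course exists
theorem bmOuter_nonpos (limit : Int) (hl : limit ≤ 0) (cats : List (String × List String))
    (hc : cats.any (fun p => !p.2.isEmpty) = true) :
    bmOuter limit cats [] [] ≠ [] := by
  induction cats with
  | nil => simp at hc
  | cons p rest ih =>
    obtain ⟨cat, courses⟩ := p
    cases courses with
    | nil =>
      simp only [List.any_cons, List.isEmpty_nil, Bool.not_true, Bool.false_or] at hc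
      simpa [bmOuter, bmInner] using ih hc
    | cons c cs =>
      have hco : PySem.Set.contains ([] : PySem.Set String) c = false := rfl
      simp only [bmOuter, bmInner, hco, Bool.false_eq_true, if_false]
      simp only [List.nil_append, List.length_cons, List.length_nil]
      rw [if_pos (by omega : limit ≤ ((0 + 1 : Nat) : Int))]
      simp

-- B unfolded: ordered dedup capped by a non-negative take
theorem alt_eq_take (cats : List (String × List String)) (limit : Int) (h : 0 ≤ limit) :
    balanced_merge_py_alt cats limit
      = (PySem.List.dedup ((cats.map Prod.snd).flatten)).take limit.toNat := by
  unfold balanced_merge_py_alt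
  rw [max_eq_left h, PySem.List.slice_to _ h]

theorem balanced_merge_eq_of_pos (cats : List (String × List String)) (limit : Int)
    (h : 1 ≤ limit) :
    balanced_merge_py cats limit = balanced_merge_py_alt cats limit := by
  unfold balanced_merge_py
  rw [alt_eq_take cats limit (by omega),
    show PySem.Set.empty = ([] : PySem.Set String) from rfl,
    bmOuter_eq limit cats [] (by simp; omega),
    PySem.List.dedup_eq_ofList, PySem.Set.ofList_eq_foldl]

-- ===== VERDICT (by name: the statement is the Claim_ definition above) =====
theorem balanced_merge_py_spec : Claim_unchanged_balanced_merge_py := by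
  intro cats limit hdom hD
  clear hdom
  unfold D_balanced_merge_py at hD
  by_cases hl : 1 ≤ limit
  · exact balanced_merge_eq_of_pos cats limit hl
  · -- limit ≤ 0 and, by ¬D_, no course exists: both sides are []
    have hc : cats.any (fun p => !p.2.isEmpty) = false := by
      by_contra hcc
      exact hD ⟨by omega, by simpa using hcc⟩
    have hall : (cats.map Prod.snd).flatten = [] := by
      simp only [List.any_eq_false] at hc
      simp only [List.flatten_eq_nil_iff, List.mem_map]
      rintro l ⟨p, hp, rfl⟩
      simpa using hc p hp
    have hA : bmOuter limit cats [] [] = [] := by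
      clear hD hc
      induction cats with
      | nil => rfl
      | cons p rest ih =>
        obtain ⟨cat, courses⟩ := p
        simp only [List.map_cons, List.flatten_cons, List.append_eq_nil_iff] at hall
        obtain ⟨rfl, hrest⟩ := hall
        simpa [bmOuter, bmInner] using ih hrest
    show balanced_merge_py cats limit = _
    unfold balanced_merge_py balanced_merge_py_alt
    rw [show PySem.Set.empty = ([] : PySem.Set String) from rfl, hA, hall,
      PySem.List.slice_to _ (le_max_right limit 0)]
    simp [PySem.List.dedup_eq_ofList, PySem.Set.ofList]

theorem balanced_merge_py_changed : Claim_changed_balanced_merge_py := by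
  unfold Claim_changed_balanced_merge_py; decide

theorem balanced_merge_py_tight : Claim_exact_balanced_merge_py := by
  intro cats limit _ hD
  obtain ⟨hl, hc⟩ := hD
  have hA := bmOuter_nonpos limit hl cats hc
  have hB : balanced_merge_py_alt cats limit = [] := by
    unfold balanced_merge_py_alt
    rw [max_eq_right (by omega), PySem.List.slice_to _ (by omega)]
    simp
  unfold balanced_merge_py
  rw [hB]
  exact hA
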